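-- pv_equiv track=rewrite | github.com/ccchiang92/hackerRank | citiesGraph.py | roadsAndLibraries
-- ===== SOURCE A (Python) =====
-- def roadsAndLibraries(n, c_lib, c_road, cities):
--     if c_road>=c_lib:
--         return c_lib*n
--     else:
--         connections={}
--         for road in cities:
--             a=road[0]-1
--             b=road[1]-1
--             connections[a]=connections.get(a,[])+[b]
--             connections[b]=connections.get(b,[])+[a]
--         for i in range(n):
--             if not connections.get(i,False):
--                 connections[i]=[]
--         visited=set()
--         searched=set()
--         tot=0
--         nextStack=[x for x in range(n)]
--         while nextStack:
--             i = nextStack.pop()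
--             if i not in visited:
--                 visited.add(i)
--                 searched.add(i)
--                 tot+=c_lib
--                 for city in connections[i]:
--                     if city not in visited:
--                         visited.add(city)
--                         tot+=c_road
--                         nextStack.append(city)
--             elif i not in searched:
--                 searched.add(i)
--                 for city in connections[i]:
--                     if city not in visited:
--                         visited.add(city)
--                         tot+=c_road
--                         nextStack.append(city)
--         return tot
-- ===== SOURCE B (Python) =====
-- def roadsAndLibraries(n, c_lib, c_road, cities):
--     # Merge connected components directly over the road list, then price each
--     # component as one library plus a road per additional city.
--     if c_road >= c_lib:
--         return c_lib * n
--     comps = []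
--     for road in cities:
--         a, b = road[0] - 1, road[1] - 1
--         touching = [c for c in comps if a in c or b in c]
--         rest = [c for c in comps if a not in c and b not in c]
--         merged = [x for c in touching for x in c]
--         if a not in merged:
--             merged.append(a)
--         if b not in merged:
--             merged.append(b)
--         comps = rest + [merged]
--     for i in range(n):
--         if not any(i in c for c in comps):
--             comps.append([i])
--     return sum(c_lib + c_road * (len(c) - 1) for c in comps)
-- ===== Notes on version B (the rewrite author's own statement) =====
-- stated objective: alternative
-- what changed: Replaces A's adjacency-dict construction plus global-stack DFS with a fold over the roads that maintains the connected components as disjoint node groups (merging the groups touched by each road) and prices every component directly; Pre_ restricts to the natural domain (every priced road a pair of cities in 1..n), since A raises on roads shorter than 2 and its treatment of out-of-range endpoints (stray nodes visited only when reachable from a seeded city) is an accident of its DFS seeding.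
-- outside the precondition, e.g. on roadsAndLibraries(1, 5, 1, [[2, 3]]): A returns 5, B returns 11
import Mathlib
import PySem

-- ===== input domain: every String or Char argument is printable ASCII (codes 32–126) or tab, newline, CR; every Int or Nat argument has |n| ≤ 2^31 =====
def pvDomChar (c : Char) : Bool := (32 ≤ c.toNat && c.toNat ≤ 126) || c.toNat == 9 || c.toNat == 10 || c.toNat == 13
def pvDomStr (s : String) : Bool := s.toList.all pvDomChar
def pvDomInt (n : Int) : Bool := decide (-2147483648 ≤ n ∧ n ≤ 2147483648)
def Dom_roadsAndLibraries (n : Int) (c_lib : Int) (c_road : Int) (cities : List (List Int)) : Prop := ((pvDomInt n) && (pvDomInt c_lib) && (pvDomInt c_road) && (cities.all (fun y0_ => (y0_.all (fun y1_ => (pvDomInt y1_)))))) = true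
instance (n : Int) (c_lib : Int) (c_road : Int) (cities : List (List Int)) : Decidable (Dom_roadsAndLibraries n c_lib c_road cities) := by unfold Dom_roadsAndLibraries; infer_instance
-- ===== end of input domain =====

-- B replaces A's adjacency-dict + stack DFS by a fold over the roads that merges
-- connected components as disjoint node groups and prices each component directly
-- (objective: alternative algorithm, not faster).

-- ===== PORT A =====
-- connections[a]=connections.get(a,[])+[b]; connections[b]=connections.get(b,[])+[a]
def pvA_line (d : PySem.Dict Int (List Int)) (road : List Int) : PySem.Dict Int (List Int) :=
  let a := PySem.List.pyGetD road 0 0 - 1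
  let b := PySem.List.pyGetD road 1 0 - 1
  let d1 := d.insert a (d.getD a [] ++ [b])
  d1.insert b (d1.getD b [] ++ [a])

-- for i in range(n): if not connections.get(i,False): connections[i]=[]
-- (get(i,False) is falsy exactly when the key is missing or its list is empty)
def pvA_fillStep (d : PySem.Dict Int (List Int)) (i : Int) : PySem.Dict Int (List Int) :=
  match d.get? i with
  | some l => if l = [] then d.insert i [] else d
  | none => d.insert i []

-- for city in connections[i]: if city not in visited: visited.add(city); tot+=c_road; push
-- (the stack is represented with its TOP at the HEAD; Python's append/pop work at the end)
def pvA_expand (c_road : Int) : List Int → PySem.Set Int → Int → List Int →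
    PySem.Set Int × Int × List Int
  | [], visited, tot, stack => (visited, tot, stack)
  | city :: rest, visited, tot, stack =>
    if PySem.Set.contains visited city then pvA_expand c_road rest visited tot stack
    else pvA_expand c_road rest (PySem.Set.add visited city) (tot + c_road) (city :: stack)

-- the while-loop over nextStack; fuel only makes the recursion structural (each iteration
-- pops one entry and every push marks a fresh node visited, so the stated fuel suffices)
def pvA_loop (conn : PySem.Dict Int (List Int)) (c_lib c_road : Int) :
    Nat → PySem.Set Int → PySem.Set Int → Int → List Int → Int
  | 0, _, _, tot, _ => tot
  | _ + 1, _, _, tot, [] => tot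
  | fuel + 1, visited, searched, tot, i :: stack =>
    if PySem.Set.contains visited i then
      if PySem.Set.contains searched i then
        pvA_loop conn c_lib c_road fuel visited searched tot stack
      else
        let r := pvA_expand c_road (conn.getD i []) visited tot stack
        pvA_loop conn c_lib c_road fuel r.1 (PySem.Set.add searched i) r.2.1 r.2.2
    else
      let r := pvA_expand c_road (conn.getD i [])
        (PySem.Set.add visited i) (tot + c_lib) stack
      pvA_loop conn c_lib c_road fuel r.1 (PySem.Set.add searched i) r.2.1 r.2.2

def roadsAndLibraries (n : Int) (c_lib : Int) (c_road : Int) (cities : List (List Int)) : Int :=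
  if c_road ≥ c_lib then c_lib * n
  else
    let conn := (PySem.List.pyRange 0 n 1).foldl pvA_fillStep (cities.foldl pvA_line PySem.Dict.empty)
    -- nextStack=[0..n-1] popped from the end = reversed range popped from the head
    pvA_loop conn c_lib c_road (n.toNat + n.toNat + 2 * cities.length + 1)
      PySem.Set.empty PySem.Set.empty 0 (PySem.List.pyRange 0 n 1).reverse

-- ===== PORT B =====
-- touching = [c for c in comps if a in c or b in c]; rest = the others;
-- merged = their concatenation, with a and b appended if missing
def pvB_merge (comps : List (List Int)) (a b : Int) : List (List Int) :=
  let touching := comps.filter (fun c => decide (a ∈ c) || decide (b ∈ c))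
  let rest := comps.filter (fun c => !decide (a ∈ c) && !decide (b ∈ c))
  let j0 := touching.flatten
  let j1 := if a ∈ j0 then j0 else j0 ++ [a]
  let j2 := if b ∈ j1 then j1 else j1 ++ [b]
  rest ++ [j2]

def pvB_step (comps : List (List Int)) (road : List Int) : List (List Int) :=
  pvB_merge comps (PySem.List.pyGetD road 0 0 - 1) (PySem.List.pyGetD road 1 0 - 1)

def pvB_single (comps : List (List Int)) (i : Int) : List (List Int) :=
  if comps.any (fun c => decide (i ∈ c)) then comps else comps ++ [[i]]

def roadsAndLibraries_alt (n : Int) (c_lib : Int) (c_road : Int) (cities : List (List Int)) : Int :=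
  if c_road ≥ c_lib then c_lib * n
  else
    let comps := (PySem.List.pyRange 0 n 1).foldl pvB_single (cities.foldl pvB_step [])
    (comps.map (fun c => c_lib + c_road * ((c.length : Int) - 1))).sum

-- ===== PRECONDITION & SPEC =====
-- Pre_ restricts the priced case to the problem's natural domain: every road a pair of
-- cities named 1..n.  A raises (IndexError) on roads shorter than 2, and its value on
-- out-of-range endpoints (stray nodes priced only when reachable from a seeded city) is
-- an accident of its DFS seeding, so both are excluded.
def Pre_roadsAndLibraries (n : Int) (c_lib : Int) (c_road : Int) (cities : List (List Int)) : Prop :=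
  c_road ≥ c_lib ∨ ∀ road ∈ cities, 2 ≤ road.length ∧
    1 ≤ PySem.List.pyGetD road 0 0 ∧ PySem.List.pyGetD road 0 0 ≤ n ∧
    1 ≤ PySem.List.pyGetD road 1 0 ∧ PySem.List.pyGetD road 1 0 ≤ n
instance (n : Int) (c_lib : Int) (c_road : Int) (cities : List (List Int)) : Decidable (Pre_roadsAndLibraries n c_lib c_road cities) := by unfold Pre_roadsAndLibraries; infer_instance

def pvWitness_roadsAndLibraries : Int × Int × Int × List (List Int) := (3, 2, 1, [[1, 2]])

def Spec_roadsAndLibraries (n : Int) (c_lib : Int) (c_road : Int) (cities : List (List Int)) (out : Int) : Prop := out = roadsAndLibraries_alt n c_lib c_road cities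
instance (n : Int) (c_lib : Int) (c_road : Int) (cities : List (List Int)) (out : Int) : Decidable (Spec_roadsAndLibraries n c_lib c_road cities out) := by unfold Spec_roadsAndLibraries; infer_instance

-- ===== CLAIM (what is proved, stated in full; the proofs are below) =====
def Claim_equal_roadsAndLibraries : Prop := ∀ (n : Int) (c_lib : Int) (c_road : Int) (cities : List (List Int)), Dom_roadsAndLibraries n c_lib c_road cities → Pre_roadsAndLibraries n c_lib c_road cities → Spec_roadsAndLibraries n c_lib c_road cities (roadsAndLibraries n c_lib c_road cities)

-- ===== LEMMAS AND PROOFS =====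

-- The undirected step relation generated by an edge list, its closure, and the node set.
def pvEStep (es : List (Int × Int)) (x y : Int) : Prop := (x, y) ∈ es ∨ (y, x) ∈ es

def pvConn (es : List (Int × Int)) : Int → Int → Prop := Relation.ReflTransGen (pvEStep es)

def pvEdges (cities : List (List Int)) : List (Int × Int) :=
  cities.map (fun r => (PySem.List.pyGetD r 0 0 - 1, PySem.List.pyGetD r 1 0 - 1))

def pvEnds (es : List (Int × Int)) (x : Int) : Prop := ∃ p ∈ es, x = p.1 ∨ x = p.2

def pvNodes (n : Int) (es : List (Int × Int)) : List Int :=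
  PySem.List.dedup (PySem.List.pyRange 0 n 1 ++ es.flatMap (fun p => [p.1, p.2]))

theorem pvEStep_symm {es : List (Int × Int)} {x y : Int} (h : pvEStep es x y) : pvEStep es y x := by
  unfold pvEStep at *; tauto

theorem pvConn_symm {es : List (Int × Int)} {x y : Int} (h : pvConn es x y) : pvConn es y x :=
  (Relation.ReflTransGen.symmetric (fun _ _ hs => pvEStep_symm hs)) h

theorem pvConn_trans {es : List (Int × Int)} {x y z : Int}
    (h1 : pvConn es x y) (h2 : pvConn es y z) : pvConn es x z :=
  Relation.ReflTransGen.trans h1 h2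

theorem pvConn_step {es : List (Int × Int)} {x y : Int} (h : pvEStep es x y) : pvConn es x y :=
  Relation.ReflTransGen.single h

theorem pvConn_mono {es : List (Int × Int)} (e : Int × Int) {x y : Int}
    (h : pvConn es x y) : pvConn (es ++ [e]) x y := by
  induction h with
  | refl => exact Relation.ReflTransGen.refl
  | tail _ hs ih =>
      exact Relation.ReflTransGen.tail ih (by unfold pvEStep at *; simp only [List.mem_append]; tauto)

theorem pvConn_append_single {es : List (Int × Int)} {a b x y : Int} :
    pvConn (es ++ [(a, b)]) x y ↔
      pvConn es x y ∨ (pvConn es x a ∧ pvConn es b y) ∨ (pvConn es x b ∧ pvConn es a y) := by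
  constructor
  · intro h
    induction h with
    | refl => exact Or.inl Relation.ReflTransGen.refl
    | tail _ hs ih =>
        rename_i m c _
        have hs' : pvEStep es m c ∨ (m = a ∧ c = b) ∨ (m = b ∧ c = a) := by
          unfold pvEStep at *
          simp only [List.mem_append, List.mem_singleton, Prod.mk.injEq] at hs ⊢
          tauto
        rcases hs' with hs' | ⟨rfl, rfl⟩ | ⟨rfl, rfl⟩
        · rcases ih with h1 | ⟨h1, h2⟩ | ⟨h1, h2⟩
          · exact Or.inl (h1.tail hs')
          · exact Or.inr (Or.inl ⟨h1, h2.tail hs'⟩)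
          · exact Or.inr (Or.inr ⟨h1, h2.tail hs'⟩)
        · rcases ih with h1 | ⟨h1, h2⟩ | ⟨h1, h2⟩
          · exact Or.inr (Or.inl ⟨h1, Relation.ReflTransGen.refl⟩)
          · exact Or.inr (Or.inl ⟨h1, Relation.ReflTransGen.refl⟩)
          · exact Or.inl h1
        · rcases ih with h1 | ⟨h1, h2⟩ | ⟨h1, h2⟩
          · exact Or.inr (Or.inr ⟨h1, Relation.ReflTransGen.refl⟩)
          · exact Or.inl h1
          · exact Or.inr (Or.inr ⟨h1, Relation.ReflTransGen.refl⟩)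
  · intro h
    have hab : pvConn (es ++ [(a, b)]) a b :=
      pvConn_step (Or.inl (by simp))
    rcases h with h1 | ⟨h1, h2⟩ | ⟨h1, h2⟩
    · exact pvConn_mono _ h1
    · exact pvConn_trans (pvConn_trans (pvConn_mono _ h1) hab) (pvConn_mono _ h2)
    · exact pvConn_trans (pvConn_trans (pvConn_mono _ h1) (pvConn_symm hab)) (pvConn_mono _ h2)

theorem pvConn_escape {es : List (Int × Int)} {x y : Int}
    (h : pvConn es x y) (hx : ¬ pvEnds es x) : y = x := by
  rcases Relation.ReflTransGen.cases_head h with rfl | ⟨c, hs, _⟩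
  · rfl
  · rcases hs with hs | hs
    · exact absurd ⟨(x, c), hs, Or.inl rfl⟩ hx
    · exact absurd ⟨(c, x), hs, Or.inr rfl⟩ hx

theorem pvClosed_path {es : List (Int × Int)} {V : List Int}
    (hcl : ∀ x ∈ V, ∀ y, pvEStep es x y → y ∈ V) {x y : Int}
    (h : pvConn es x y) (hx : x ∈ V) : y ∈ V := by
  induction h with
  | refl => exact hx
  | tail _ hs ih => exact hcl _ ih _ hs

theorem pvEnds_mem_nodes {n : Int} {es : List (Int × Int)} {x : Int}
    (h : pvEnds es x) : x ∈ pvNodes n es := by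
  rcases h with ⟨p, hp, hx⟩
  simp only [pvNodes, PySem.List.dedup_eq_ofList, PySem.Set.mem_ofList, List.mem_append,
    List.mem_flatMap]
  right; exact ⟨p, hp, by simpa using by tauto⟩

theorem pvStart_mem_nodes {n : Int} {es : List (Int × Int)} {x : Int}
    (h1 : 0 ≤ x) (h2 : x < n) : x ∈ pvNodes n es := by
  simp only [pvNodes, PySem.List.dedup_eq_ofList, PySem.Set.mem_ofList, List.mem_append]
  left; exact (PySem.List.mem_pyRange_one).mpr ⟨h1, h2⟩

theorem pvNodes_length_le (n : Int) (cities : List (List Int)) :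
    (pvNodes n (pvEdges cities)).length ≤ n.toNat + 2 * cities.length := by
  unfold pvNodes
  rw [PySem.List.dedup_eq_ofList]
  refine le_trans (PySem.Set.length_ofList_le _) ?_
  simp only [List.length_append, PySem.List.length_pyRange_one]
  have h1 : ∀ es : List (Int × Int), (es.flatMap (fun p => [p.1, p.2])).length = 2 * es.length := by
    intro es; induction es with
    | nil => simp
    | cons e es ih => simp only [List.flatMap_cons, List.length_append, ih]; simp; omega
  have h2 := h1 (pvEdges cities)
  have h3 : (pvEdges cities).length = cities.length := by simp [pvEdges]
  omega

theorem pvNodup_length_le {l1 l2 : List Int} (hnd : l1.Nodup) (hsub : ∀ x ∈ l1, x ∈ l2) :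
    l1.length ≤ l2.length := by
  classical
  calc l1.length = l1.toFinset.card := (List.toFinset_card_of_nodup hnd).symm
    _ ≤ l2.toFinset.card := Finset.card_le_card (fun x hx => by
        simp only [List.mem_toFinset] at *; exact hsub x hx)
    _ ≤ l2.length := l2.toFinset_card_le

-- ---- A side: the adjacency dictionary realizes pvEStep ----

theorem pvEStep_cons {a b j y : Int} {es : List (Int × Int)} :
    pvEStep ((a, b) :: es) j y ↔ (j = a ∧ y = b) ∨ (j = b ∧ y = a) ∨ pvEStep es j y := by
  simp only [pvEStep, List.mem_cons, Prod.mk.injEq]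
  tauto

theorem pvLine_getD_mem (d : PySem.Dict Int (List Int)) (road : List Int) (j y : Int) :
    y ∈ (pvA_line d road).getD j [] ↔
      y ∈ d.getD j [] ∨
        (j = PySem.List.pyGetD road 0 0 - 1 ∧ y = PySem.List.pyGetD road 1 0 - 1) ∨
        (j = PySem.List.pyGetD road 1 0 - 1 ∧ y = PySem.List.pyGetD road 0 0 - 1) := by
  simp only [pvA_line, PySem.Dict.getD_insert]
  split_ifs <;> (try subst_vars) <;> (try simp_all only [List.mem_append, List.mem_singleton]) <;> tauto

theorem pvBuild_getD_mem (cities : List (List Int)) : ∀ (d : PySem.Dict Int (List Int)) (j y : Int),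
    y ∈ (cities.foldl pvA_line d).getD j [] ↔
      y ∈ d.getD j [] ∨ pvEStep (pvEdges cities) j y := by
  induction cities with
  | nil =>
      intro d j y
      simp [pvEdges, pvEStep]
  | cons road rest ih =>
      intro d j y
      simp only [List.foldl_cons]
      rw [ih (pvA_line d road) j y, pvLine_getD_mem]
      have : pvEdges (road :: rest) =
          (PySem.List.pyGetD road 0 0 - 1, PySem.List.pyGetD road 1 0 - 1) :: pvEdges rest := rfl
      rw [this, pvEStep_cons]
      tauto

theorem pvFillStep_getD (d : PySem.Dict Int (List Int)) (i j : Int) :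
    (pvA_fillStep d i).getD j [] = d.getD j [] := by
  cases hg : d.get? i with
  | none =>
      have hm : pvA_fillStep d i = d.insert i [] := by unfold pvA_fillStep; rw [hg]
      rw [hm, PySem.Dict.getD_insert]
      split_ifs with hj
      · subst hj; rw [PySem.Dict.getD_eq_get?_getD, hg]; rfl
      · rfl
  | some l =>
      by_cases hl : l = []
      · subst hl
        have hm : pvA_fillStep d i = d.insert i [] := by unfold pvA_fillStep; rw [hg]; simp
        rw [hm, PySem.Dict.getD_insert]
        split_ifs with hj
        · subst hj; rw [PySem.Dict.getD_eq_get?_getD, hg]; rfl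
        · rfl
      · have hm : pvA_fillStep d i = d := by unfold pvA_fillStep; rw [hg]; simp [hl]
        rw [hm]

theorem pvFill_getD (is : List Int) (d : PySem.Dict Int (List Int)) (j : Int) :
    (is.foldl pvA_fillStep d).getD j [] = d.getD j [] := by
  induction is generalizing d with
  | nil => rfl
  | cons i is ih => simpa [List.foldl_cons, pvFillStep_getD] using ih (pvA_fillStep d i)

-- ---- A side: the inner for-loop over connections[i] ----

theorem pvA_expand_spec (c_road : Int) (nbrs : List Int) :
    ∀ (V : List Int) (tot : Int) (stack : List Int),
    ∃ newL : List Int,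
      (pvA_expand c_road nbrs V tot stack).1 = V ++ newL ∧
      (pvA_expand c_road nbrs V tot stack).2.1 = tot + c_road * newL.length ∧
      (pvA_expand c_road nbrs V tot stack).2.2 = newL.reverse ++ stack ∧
      newL.Nodup ∧ (∀ x ∈ newL, x ∉ V) ∧ (∀ x ∈ newL, x ∈ nbrs) ∧
      (∀ x ∈ nbrs, x ∈ V ++ newL) := by
  induction nbrs with
  | nil =>
      intro V tot stack
      exact ⟨[], by simp [pvA_expand]⟩
  | cons city rest ih =>
      intro V tot stack
      by_cases hc : city ∈ V
      · obtain ⟨L, e1, e2, e3, e4, e5, e6, e7⟩ := ih V tot stack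
        refine ⟨L, ?_, ?_, ?_, e4, e5, fun x hx => List.mem_cons_of_mem _ (e6 x hx), ?_⟩
        · simpa [pvA_expand, hc] using e1
        · simpa [pvA_expand, hc] using e2
        · simpa [pvA_expand, hc] using e3
        · intro x hx
          rcases List.mem_cons.mp hx with rfl | hx
          · exact List.mem_append.mpr (Or.inl hc)
          · exact e7 x hx
      · have hadd : PySem.Set.add V city = V ++ [city] := PySem.Set.add_of_not_mem hc
        obtain ⟨L, e1, e2, e3, e4, e5, e6, e7⟩ := ih (V ++ [city]) (tot + c_road) (city :: stack)
        have hstep : pvA_expand c_road (city :: rest) V tot stack =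
            pvA_expand c_road rest (V ++ [city]) (tot + c_road) (city :: stack) := by
          simp [pvA_expand, hc]
        refine ⟨city :: L, ?_, ?_, ?_, ?_, ?_, ?_, ?_⟩
        · rw [hstep, e1]; simp
        · rw [hstep, e2]; simp only [List.length_cons]; push_cast; ring
        · rw [hstep, e3]; simp
        · exact List.nodup_cons.mpr ⟨fun h => (e5 city h) (by simp), e4⟩
        · intro x hx
          rcases List.mem_cons.mp hx with rfl | hx
          · exact hc
          · exact fun hv => e5 x hx (by simp [hv])
        · intro x hx
          rcases List.mem_cons.mp hx with rfl | hx
          · simp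
          · exact List.mem_cons_of_mem _ (e6 x hx)
        · intro x hx
          rcases List.mem_cons.mp hx with rfl | hx
          · simp
          · have := e7 x hx
            simp only [List.append_assoc, List.singleton_append, List.mem_append,
              List.mem_cons] at this ⊢
            tauto

-- ---- A side: the while-loop invariant ----

structure pvAInv (n : Int) (es : List (Int × Int)) (c_lib c_road : Int) (R : Finset Int)
    (V S : List Int) (tot : Int) (T U : List Int) : Prop where
  sub_sv : ∀ x ∈ S, x ∈ V
  nodupV : V.Nodup
  vN : ∀ x ∈ V, x ∈ pvNodes n es
  reach : ∀ x ∈ V, ∃ s0, 0 ≤ s0 ∧ s0 < n ∧ pvConn es s0 x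
  closedS : ∀ x ∈ S, ∀ y, pvEStep es x y → y ∈ V
  frontierT : ∀ x ∈ V, x ∉ S → x ∈ T
  tV : ∀ x ∈ T, x ∈ V
  uSuffix : U <:+ (PySem.List.pyRange 0 n 1).reverse
  startsCov : ∀ x : Int, 0 ≤ x → x < n → x ∈ V ∨ x ∈ U
  rSub : ∀ r ∈ R, r ∈ V
  rSep : ∀ r ∈ R, ∀ r' ∈ R, r ≠ r' → ¬ pvConn es r r'
  rCov : ∀ x ∈ V, ∃ r ∈ R, pvConn es r x
  acct : tot = c_lib * R.card + c_road * ((V.length : Int) - R.card)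

theorem pvA_loop_nil (conn : PySem.Dict Int (List Int)) (c_lib c_road : Int) (fuel : Nat)
    (V S : List Int) (tot : Int) :
    pvA_loop conn c_lib c_road (fuel + 1) V S tot [] = tot := by
  simp [pvA_loop]

theorem pvA_loop_cons_skip (conn : PySem.Dict Int (List Int)) (c_lib c_road : Int) (fuel : Nat)
    (V S : List Int) (tot : Int) (i : Int) (st : List Int) (hv : i ∈ V) (hs : i ∈ S) :
    pvA_loop conn c_lib c_road (fuel + 1) V S tot (i :: st) =
      pvA_loop conn c_lib c_road fuel V S tot st := by
  simp [pvA_loop, hv, hs]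

theorem pvA_loop_cons_search (conn : PySem.Dict Int (List Int)) (c_lib c_road : Int) (fuel : Nat)
    (V S : List Int) (tot : Int) (i : Int) (st : List Int) (hv : i ∈ V) (hs : i ∉ S) :
    pvA_loop conn c_lib c_road (fuel + 1) V S tot (i :: st) =
      pvA_loop conn c_lib c_road fuel
        (pvA_expand c_road (conn.getD i []) V tot st).1
        (PySem.Set.add S i)
        (pvA_expand c_road (conn.getD i []) V tot st).2.1
        (pvA_expand c_road (conn.getD i []) V tot st).2.2 := by
  simp [pvA_loop, hv, hs]

theorem pvA_loop_cons_root (conn : PySem.Dict Int (List Int)) (c_lib c_road : Int) (fuel : Nat)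
    (V S : List Int) (tot : Int) (i : Int) (st : List Int) (hv : i ∉ V) :
    pvA_loop conn c_lib c_road (fuel + 1) V S tot (i :: st) =
      pvA_loop conn c_lib c_road fuel
        (pvA_expand c_road (conn.getD i []) (PySem.Set.add V i) (tot + c_lib) st).1
        (PySem.Set.add S i)
        (pvA_expand c_road (conn.getD i []) (PySem.Set.add V i) (tot + c_lib) st).2.1
        (pvA_expand c_road (conn.getD i []) (PySem.Set.add V i) (tot + c_lib) st).2.2 := by
  simp [pvA_loop, hv]

theorem pvA_final {n : Int} {es : List (Int × Int)} {c_lib c_road : Int} {R : Finset Int}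
    {V S : List Int} {tot : Int}
    (hinv : pvAInv n es c_lib c_road R V S tot [] []) :
    tot = c_lib * R.card + c_road * ((V.length : Int) - R.card) ∧
    V.Nodup ∧
    (∀ x : Int, x ∈ V ↔ ∃ s0, 0 ≤ s0 ∧ s0 < n ∧ pvConn es s0 x) ∧
    (∀ r ∈ R, r ∈ V) ∧
    (∀ r ∈ R, ∀ r' ∈ R, r ≠ r' → ¬ pvConn es r r') ∧
    (∀ x ∈ V, ∃ r ∈ R, pvConn es r x) := by
  have hVS : ∀ x ∈ V, x ∈ S := by
    intro x hx
    by_contra hxs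
    exact absurd (hinv.frontierT x hx hxs) (List.not_mem_nil)
  have hVclosed : ∀ x ∈ V, ∀ y, pvEStep es x y → y ∈ V :=
    fun x hx => hinv.closedS x (hVS x hx)
  refine ⟨hinv.acct, hinv.nodupV, ?_, hinv.rSub, hinv.rSep, hinv.rCov⟩
  intro x
  constructor
  · exact hinv.reach x
  · rintro ⟨s0, h0, hn, hconn⟩
    rcases hinv.startsCov s0 h0 hn with hs | hs
    · exact pvClosed_path hVclosed hconn hs
    · cases hs

theorem pvA_loop_post (n : Int) (es : List (Int × Int)) (conn : PySem.Dict Int (List Int))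
    (c_lib c_road : Int)
    (hconn : ∀ i y : Int, y ∈ conn.getD i [] ↔ pvEStep es i y) :
    ∀ (fuel : Nat) (V S : List Int) (tot : Int) (T U : List Int) (R : Finset Int),
      pvAInv n es c_lib c_road R V S tot T U →
      fuel ≥ (T ++ U).length + ((pvNodes n es).length - V.length) →
      ∃ (Vf : List Int) (Rf : Finset Int),
        pvA_loop conn c_lib c_road fuel V S tot (T ++ U)
          = c_lib * Rf.card + c_road * ((Vf.length : Int) - Rf.card) ∧
        Vf.Nodup ∧
        (∀ x : Int, x ∈ Vf ↔ ∃ s0, 0 ≤ s0 ∧ s0 < n ∧ pvConn es s0 x) ∧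
        (∀ r ∈ Rf, r ∈ Vf) ∧
        (∀ r ∈ Rf, ∀ r' ∈ Rf, r ≠ r' → ¬ pvConn es r r') ∧
        (∀ x ∈ Vf, ∃ r ∈ Rf, pvConn es r x) := by
  intro fuel
  induction fuel with
  | zero =>
      intro V S tot T U R hinv hfuel
      have hT : T = [] := by
        cases T with
        | nil => rfl
        | cons a t => simp at hfuel
      have hU : U = [] := by
        cases U with
        | nil => rfl
        | cons a t => subst hT; simp at hfuel
      subst hT; subst hU
      obtain ⟨h0, h1, h2, h3, h4, h5⟩ := pvA_final hinv
      exact ⟨V, R, by simpa [pvA_loop] using h0, h1, h2, h3, h4, h5⟩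
  | succ fuel ih =>
      intro V S tot T U R hinv hfuel
      have hlenVN : V.length ≤ (pvNodes n es).length :=
        pvNodup_length_le hinv.nodupV hinv.vN
      cases hTU : T ++ U with
      | nil =>
          rcases List.append_eq_nil_iff.mp hTU with ⟨hT, hU⟩
          subst hT; subst hU
          obtain ⟨h0, h1, h2, h3, h4, h5⟩ := pvA_final hinv
          exact ⟨V, R, by simpa [pvA_loop_nil] using h0, h1, h2, h3, h4, h5⟩
      | cons i rest =>
          by_cases hiV : i ∈ V
          · by_cases hiS : i ∈ S
            · -- skip step: i already searched
              rw [pvA_loop_cons_skip conn c_lib c_road fuel V S tot i rest hiV hiS]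
              -- re-split rest into T' ++ U'
              rcases T with _ | ⟨t0, T2⟩
              · -- T = [], so U = i :: rest
                simp only [List.nil_append] at hTU
                have hinv' : pvAInv n es c_lib c_road R V S tot [] rest := by
                  obtain ⟨f1, f2, f3, f4, f5, f6, f7, f8, f9, f10, f11, f12, f13⟩ := hinv
                  refine ⟨f1, f2, f3, f4, f5, f6, f7, ?_, ?_, f10, f11, f12, f13⟩
                  · rw [hTU] at f8
                    exact (List.suffix_cons i rest).trans f8
                  · intro x hx1 hx2
                    rcases f9 x hx1 hx2 with hx | hx
                    · exact Or.inl hx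
                    · rw [hTU] at hx
                      rcases List.mem_cons.mp hx with rfl | hx
                      · exact Or.inl hiV
                      · exact Or.inr hx
                rw [hTU] at hfuel
                have := ih V S tot [] rest R hinv' (by
                  simp only [List.nil_append, List.length_cons] at hfuel ⊢
                  omega)
                simpa using this
              · -- T = t0 :: T2, t0 = i, rest = T2 ++ U
                simp only [List.cons_append, List.cons.injEq] at hTU
                obtain ⟨rfl, hrest⟩ := hTU
                have hinv' : pvAInv n es c_lib c_road R V S tot T2 U := by
                  obtain ⟨f1, f2, f3, f4, f5, f6, f7, f8, f9, f10, f11, f12, f13⟩ := hinv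
                  refine ⟨f1, f2, f3, f4, f5, ?_, ?_, f8, f9, f10, f11, f12, f13⟩
                  · intro x hx1 hx2
                    rcases List.mem_cons.mp (f6 x hx1 hx2) with rfl | hx
                    · exact absurd hiS hx2
                    · exact hx
                  · intro x hx
                    exact f7 x (List.mem_cons_of_mem _ hx)
                have := ih V S tot T2 U R hinv' (by
                  simp only [List.length_append, List.length_cons] at hfuel ⊢
                  omega)
                rw [← hrest]
                exact this
            · -- search step: i visited but not searched; T = i :: T2
              rcases T with _ | ⟨t0, T2⟩
              · exfalso
                exact absurd (hinv.frontierT i hiV hiS) (List.not_mem_nil)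
              · simp only [List.cons_append, List.cons.injEq] at hTU
                obtain ⟨ht0, hrest⟩ := hTU
                rw [pvA_loop_cons_search conn c_lib c_road fuel V S tot i rest hiV hiS]
                obtain ⟨newL, e1, e2, e3, e4, e5, e6, e7⟩ :=
                  pvA_expand_spec c_road (conn.getD i []) V tot rest
                rw [e1, e2, e3]
                have hnewN : ∀ x ∈ newL, x ∈ pvNodes n es := by
                  intro x hx
                  have hstep : pvEStep es i x := (hconn i x).mp (e6 x hx)
                  rcases hstep with hs | hs
                  · exact pvEnds_mem_nodes ⟨(i, x), hs, Or.inr rfl⟩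
                  · exact pvEnds_mem_nodes ⟨(x, i), hs, Or.inl rfl⟩
                have hnewConn : ∀ x ∈ newL, pvConn es i x :=
                  fun x hx => pvConn_step ((hconn i x).mp (e6 x hx))
                have hinv' : pvAInv n es c_lib c_road R (V ++ newL) (PySem.Set.add S i)
                    (tot + c_road * newL.length) (newL.reverse ++ T2) U := by
                  obtain ⟨f1, f2, f3, f4, f5, f6, f7, f8, f9, f10, f11, f12, f13⟩ := hinv
                  refine ⟨?_, ?_, ?_, ?_, ?_, ?_, ?_, f8, ?_, ?_, f11, ?_, ?_⟩
                  · intro x hx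
                    rcases (PySem.Set.mem_add _ _ _).mp hx with hx | rfl
                    · exact List.mem_append.mpr (Or.inl (f1 x hx))
                    · exact List.mem_append.mpr (Or.inl hiV)
                  · rw [List.nodup_append]
                    exact ⟨f2, e4, fun x hx y hy heq => e5 y hy (heq ▸ hx)⟩
                  · intro x hx
                    rcases List.mem_append.mp hx with hx | hx
                    · exact f3 x hx
                    · exact hnewN x hx
                  · intro x hx
                    rcases List.mem_append.mp hx with hx | hx
                    · exact f4 x hx
                    · rcases f4 i hiV with ⟨s0, hs1, hs2, hs3⟩
                      exact ⟨s0, hs1, hs2, pvConn_trans hs3 (hnewConn x hx)⟩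
                  · intro x hx y hy
                    rcases (PySem.Set.mem_add _ _ _).mp hx with hx | rfl
                    · exact List.mem_append.mpr (Or.inl (f5 x hx y hy))
                    · exact e7 y ((hconn x y).mpr hy)
                  · intro x hx hxs
                    have hxi : x ≠ i := fun heq => hxs (heq ▸ (PySem.Set.mem_add _ _ _).mpr (Or.inr rfl))
                    have hxS : x ∉ S := fun hxS => hxs ((PySem.Set.mem_add _ _ _).mpr (Or.inl hxS))
                    rcases List.mem_append.mp hx with hx | hx
                    · rcases List.mem_cons.mp (f6 x hx hxS) with heq | hx'
                      · exact absurd (heq.trans ht0) hxi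
                      · exact List.mem_append.mpr (Or.inr hx')
                    · exact List.mem_append.mpr (Or.inl (List.mem_reverse.mpr hx))
                  · intro x hx
                    rcases List.mem_append.mp hx with hx | hx
                    · exact List.mem_append.mpr (Or.inr (List.mem_reverse.mp hx))
                    · exact List.mem_append.mpr (Or.inl (f7 x (List.mem_cons_of_mem _ hx)))
                  · intro x hx1 hx2
                    rcases f9 x hx1 hx2 with hx | hx
                    · exact Or.inl (List.mem_append.mpr (Or.inl hx))
                    · exact Or.inr hx
                  · intro r hr
                    exact List.mem_append.mpr (Or.inl (f10 r hr))
                  · intro x hx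
                    rcases List.mem_append.mp hx with hx | hx
                    · exact f12 x hx
                    · rcases f12 i hiV with ⟨r, hr1, hr2⟩
                      exact ⟨r, hr1, pvConn_trans hr2 (hnewConn x hx)⟩
                  · rw [f13]
                    simp only [List.length_append]
                    push_cast
                    ring
                have hfrontOK := pvNodup_length_le hinv'.nodupV hinv'.vN
                have hthis := ih (V ++ newL) (PySem.Set.add S i) (tot + c_road * newL.length)
                  (newL.reverse ++ T2) U R hinv' (by
                    simp only [List.length_append, List.length_cons, List.length_reverse] at hfuel hfrontOK ⊢
                    omega)
                rw [List.append_assoc, hrest] at hthis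
                exact hthis
          · -- root step: i unvisited, so T = [] and the frontier is empty
            have hT : T = [] := by
              cases T with
              | nil => rfl
              | cons t0 T2 =>
                  simp only [List.cons_append, List.cons.injEq] at hTU
                  exact absurd (hTU.1 ▸ hinv.tV t0 (by simp)) hiV
            subst hT
            simp only [List.nil_append] at hTU
            subst hTU
            have hfront : ∀ x ∈ V, x ∈ S := by
              intro x hx
              by_contra hxs
              exact absurd (hinv.frontierT x hx hxs) (List.not_mem_nil)
            have hVclosed : ∀ x ∈ V, ∀ y, pvEStep es x y → y ∈ V :=
              fun x hx => hinv.closedS x (hfront x hx)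
            have hnoconn : ∀ x ∈ V, ¬ pvConn es x i :=
              fun x hx hc => hiV (pvClosed_path hVclosed hc hx)
            have hiStart : 0 ≤ i ∧ i < n := by
              have h1 : i ∈ (PySem.List.pyRange 0 n 1).reverse :=
                hinv.uSuffix.subset (by simp)
              rw [List.mem_reverse] at h1
              exact PySem.List.mem_pyRange_one.mp h1
            have hiN : i ∈ pvNodes n es := pvStart_mem_nodes hiStart.1 hiStart.2
            have hiR : i ∉ R := fun hr => hiV (hinv.rSub i hr)
            rw [pvA_loop_cons_root conn c_lib c_road fuel V S tot i rest hiV]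
            have haddV : PySem.Set.add V i = V ++ [i] := PySem.Set.add_of_not_mem hiV
            rw [haddV]
            obtain ⟨newL, e1, e2, e3, e4, e5, e6, e7⟩ :=
              pvA_expand_spec c_road (conn.getD i []) (V ++ [i]) (tot + c_lib) rest
            rw [e1, e2, e3]
            have hnewN : ∀ x ∈ newL, x ∈ pvNodes n es := by
              intro x hx
              have hstep : pvEStep es i x := (hconn i x).mp (e6 x hx)
              rcases hstep with hs | hs
              · exact pvEnds_mem_nodes ⟨(i, x), hs, Or.inr rfl⟩
              · exact pvEnds_mem_nodes ⟨(x, i), hs, Or.inl rfl⟩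
            have hnewConn : ∀ x ∈ newL, pvConn es i x :=
              fun x hx => pvConn_step ((hconn i x).mp (e6 x hx))
            have hinv' : pvAInv n es c_lib c_road (insert i R) (V ++ [i] ++ newL)
                (PySem.Set.add S i) (tot + c_lib + c_road * newL.length) newL.reverse rest := by
              obtain ⟨f1, f2, f3, f4, f5, f6, f7, f8, f9, f10, f11, f12, f13⟩ := hinv
              refine ⟨?_, ?_, ?_, ?_, ?_, ?_, ?_, ?_, ?_, ?_, ?_, ?_, ?_⟩
              · intro x hx
                rcases (PySem.Set.mem_add _ _ _).mp hx with hx | rfl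
                · simp only [List.append_assoc, List.mem_append]
                  exact Or.inl (f1 x hx)
                · simp
              · rw [List.nodup_append]
                refine ⟨?_, e4, fun x hx y hy heq => e5 y hy (heq ▸ hx)⟩
                rw [List.nodup_append]
                exact ⟨f2, List.nodup_singleton i,
                  fun x hx y hy heq => hiV ((List.mem_singleton.mp hy) ▸ heq ▸ hx)⟩
              · intro x hx
                simp only [List.append_assoc, List.mem_append, List.mem_singleton] at hx
                rcases hx with hx | hx | hx
                · exact f3 x hx
                · exact hx ▸ hiN
                · exact hnewN x hx
              · intro x hx
                simp only [List.append_assoc, List.mem_append, List.mem_singleton] at hx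
                rcases hx with hx | hx | hx
                · exact f4 x hx
                · exact ⟨i, hiStart.1, hiStart.2, hx ▸ Relation.ReflTransGen.refl⟩
                · exact ⟨i, hiStart.1, hiStart.2, hnewConn x hx⟩
              · intro x hx y hy
                rcases (PySem.Set.mem_add _ _ _).mp hx with hx | rfl
                · simp only [List.append_assoc, List.mem_append]
                  exact Or.inl (f5 x (hfront x (by
                    exact (f1 x hx))) y hy)
                · exact e7 y ((hconn x y).mpr hy)
              · intro x hx hxs
                have hxi : x ≠ i := fun heq => hxs (heq ▸ (PySem.Set.mem_add _ _ _).mpr (Or.inr rfl))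
                simp only [List.append_assoc, List.mem_append, List.mem_singleton] at hx
                rcases hx with hx | hx | hx
                · exact absurd (hfront x hx) (fun hxS => hxs ((PySem.Set.mem_add _ _ _).mpr (Or.inl hxS)))
                · exact absurd hx hxi
                · exact List.mem_reverse.mpr hx
              · intro x hx
                simp only [List.append_assoc, List.mem_append]
                exact Or.inr (Or.inr (List.mem_reverse.mp hx))
              · exact (List.suffix_cons i rest).trans f8
              · intro x hx1 hx2
                rcases f9 x hx1 hx2 with hx | hx
                · simp only [List.append_assoc, List.mem_append]
                  exact Or.inl (Or.inl hx)
                · rcases List.mem_cons.mp hx with rfl | hx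
                  · simp
                  · exact Or.inr hx
              · intro r hr
                rcases Finset.mem_insert.mp hr with rfl | hr
                · simp
                · simp only [List.append_assoc, List.mem_append]
                  exact Or.inl (f10 r hr)
              · intro r hr r' hr' hne
                rcases Finset.mem_insert.mp hr with rfl | hr <;>
                  rcases Finset.mem_insert.mp hr' with heq | hr'
                · exact absurd heq.symm hne
                · exact fun hc => hnoconn r' (f10 r' hr') (pvConn_symm hc)
                · exact fun hc => hnoconn r (f10 r hr) (heq ▸ hc)
                · exact f11 r hr r' hr' hne
              · intro x hx
                simp only [List.append_assoc, List.mem_append, List.mem_singleton] at hx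
                rcases hx with hx | hx | hx
                · rcases f12 x hx with ⟨r, hr1, hr2⟩
                  exact ⟨r, Finset.mem_insert_of_mem hr1, hr2⟩
                · exact ⟨i, Finset.mem_insert_self i R, hx ▸ Relation.ReflTransGen.refl⟩
                · exact ⟨i, Finset.mem_insert_self i R, hnewConn x hx⟩
              · rw [f13, Finset.card_insert_of_notMem hiR]
                simp only [List.length_append, List.length_cons, List.length_nil]
                push_cast
                ring
            have hlen' := pvNodup_length_le hinv'.nodupV hinv'.vN
            have := ih (V ++ [i] ++ newL) (PySem.Set.add S i)
              (tot + c_lib + c_road * newL.length) newL.reverse rest (insert i R) hinv' (by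
                simp only [List.length_append, List.length_cons, List.length_nil,
                  List.length_reverse] at hfuel hlen' ⊢
                omega)
            exact this

-- ---- B side: partitions into connectivity classes ----

def pvIsPart (R : Int → Int → Prop) (dom : Int → Prop) (comps : List (List Int)) : Prop :=
  (∀ c ∈ comps, c ≠ []) ∧ (∀ c ∈ comps, c.Nodup) ∧
  comps.Pairwise List.Disjoint ∧
  (∀ x : Int, (∃ c ∈ comps, x ∈ c) ↔ dom x) ∧
  (∀ c ∈ comps, ∀ x ∈ c, ∀ y : Int, R x y ↔ y ∈ c)

theorem pvIsPart_congr {R : Int → Int → Prop} {dom dom' : Int → Prop}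
    {comps : List (List Int)} (h : pvIsPart R dom comps) (hiff : ∀ x, dom x ↔ dom' x) :
    pvIsPart R dom' comps := by
  obtain ⟨h1, h2, h3, h4, h5⟩ := h
  exact ⟨h1, h2, h3, fun x => (h4 x).trans (hiff x), h5⟩

theorem pvPairwise_get {l : List (List Int)} (h : l.Pairwise List.Disjoint)
    {c d : List Int} (hc : c ∈ l) (hd : d ∈ l) (hne : c ≠ d) : List.Disjoint c d := by
  induction l with
  | nil => cases hc
  | cons e tl ih =>
      rcases List.pairwise_cons.mp h with ⟨he, htl⟩
      rcases List.mem_cons.mp hc with rfl | hc' <;> rcases List.mem_cons.mp hd with rfl | hd'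
      · exact absurd rfl hne
      · exact he d hd'
      · exact (he c hc').symm
      · exact ih htl hc' hd'

theorem pvEnds_append {es : List (Int × Int)} {a b x : Int} :
    pvEnds (es ++ [(a, b)]) x ↔ pvEnds es x ∨ x = a ∨ x = b := by
  simp only [pvEnds, List.mem_append, List.mem_singleton]
  constructor
  · rintro ⟨p, hp | hp, hx⟩
    · exact Or.inl ⟨p, hp, hx⟩
    · subst hp; tauto
  · rintro (⟨p, hp, hx⟩ | hx | hx)
    · exact ⟨p, Or.inl hp, hx⟩
    · exact ⟨(a, b), Or.inr rfl, Or.inl hx⟩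
    · exact ⟨(a, b), Or.inr rfl, Or.inr hx⟩

theorem pvB_merge_part {es : List (Int × Int)} {comps : List (List Int)} {a b : Int}
    (h : pvIsPart (pvConn es) (pvEnds es) comps) :
    pvIsPart (pvConn (es ++ [(a, b)])) (pvEnds (es ++ [(a, b)])) (pvB_merge comps a b) := by
  obtain ⟨h1, h2, h3, h4, h5⟩ := h
  set touching := comps.filter (fun c => decide (a ∈ c) || decide (b ∈ c)) with htouching
  set rest := comps.filter (fun c => !decide (a ∈ c) && !decide (b ∈ c)) with hrest
  set j0 := touching.flatten with hj0
  set j1 := if a ∈ j0 then j0 else j0 ++ [a] with hj1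
  set j2 := if b ∈ j1 then j1 else j1 ++ [b] with hj2
  have hm : pvB_merge comps a b = rest ++ [j2] := rfl
  rw [hm]
  -- membership characterizations
  have hmem0 : ∀ x : Int, x ∈ j0 ↔ ∃ c ∈ comps, x ∈ c ∧ (a ∈ c ∨ b ∈ c) := by
    intro x
    simp only [hj0, List.mem_flatten, htouching, List.mem_filter, Bool.or_eq_true,
      decide_eq_true_eq]
    constructor
    · rintro ⟨c, ⟨hcm, hab⟩, hxc⟩
      exact ⟨c, hcm, hxc, hab⟩
    · rintro ⟨c, hcm, hxc, hab⟩
      exact ⟨c, ⟨hcm, hab⟩, hxc⟩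
  have hmem1 : ∀ x : Int, x ∈ j1 ↔ x ∈ j0 ∨ x = a := by
    intro x
    rw [hj1]
    split_ifs with hin
    · constructor
      · exact Or.inl
      · rintro (hx | rfl)
        · exact hx
        · exact hin
    · simp [List.mem_append]
  have hmem2 : ∀ x : Int, x ∈ j2 ↔ x ∈ j0 ∨ x = a ∨ x = b := by
    intro x
    rw [hj2]
    split_ifs with hin
    · rw [hmem1]
      constructor
      · rintro (hx | rfl)
        · exact Or.inl hx
        · exact Or.inr (Or.inl rfl)
      · rintro (hx | hx | hx)
        · exact Or.inl hx
        · exact Or.inr hx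
        · rw [hx]; exact (hmem1 b).mp hin
    · simp only [List.mem_append, List.mem_singleton, hmem1]
      tauto
  have haj2 : a ∈ j2 := (hmem2 a).mpr (Or.inr (Or.inl rfl))
  have hbj2 : b ∈ j2 := (hmem2 b).mpr (Or.inr (Or.inr rfl))
  have hedge : pvConn (es ++ [(a, b)]) a b := pvConn_step (Or.inl (by simp))
  -- every member of j2 is connected (in es') to a
  have hconn_a : ∀ x ∈ j2, pvConn (es ++ [(a, b)]) a x := by
    intro x hx
    rcases (hmem2 x).mp hx with hx0 | rfl | rfl
    · rcases (hmem0 x).mp hx0 with ⟨c, hcm, hxc, hac | hbc⟩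
      · exact pvConn_mono _ ((h5 c hcm a hac x).mpr hxc)
      · exact pvConn_trans hedge (pvConn_mono _ ((h5 c hcm b hbc x).mpr hxc))
    · exact Relation.ReflTransGen.refl
    · exact hedge
  -- j2 is closed under es-connectivity from a or b
  have hclose : ∀ z y : Int, (z = a ∨ z = b) → pvConn es z y → y ∈ j2 := by
    intro z y hz hzy
    by_cases hdz : pvEnds es z
    · rcases (h4 z).mpr hdz with ⟨c, hcm, hzc⟩
      have hyc : y ∈ c := (h5 c hcm z hzc y).mp hzy
      refine (hmem2 y).mpr (Or.inl ((hmem0 y).mpr ⟨c, hcm, hyc, ?_⟩))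
      rcases hz with rfl | rfl
      · exact Or.inl hzc
      · exact Or.inr hzc
    · have := pvConn_escape hzy hdz
      subst this
      rcases hz with rfl | rfl
      · exact haj2
      · exact hbj2
  have hclosed2 : ∀ y : Int, pvConn (es ++ [(a, b)]) a y → y ∈ j2 := by
    intro y hy
    rcases pvConn_append_single.mp hy with hy | ⟨_, hy⟩ | ⟨_, hy⟩
    · exact hclose a y (Or.inl rfl) hy
    · exact hclose b y (Or.inr rfl) hy
    · exact hclose a y (Or.inl rfl) hy
  -- rest classes
  have hrmem : ∀ c ∈ rest, c ∈ comps ∧ a ∉ c ∧ b ∉ c := by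
    intro c hcm
    have := List.mem_filter.mp hcm
    simpa [Bool.and_eq_true, Bool.not_eq_true', decide_eq_false_iff_not] using this
  -- nodup of j2
  have hndj0 : j0.Nodup := by
    rw [hj0, List.nodup_flatten]
    exact ⟨fun c hc => h2 c (List.mem_of_mem_filter hc), h3.sublist List.filter_sublist⟩
  have hndj1 : j1.Nodup := by
    rw [hj1]
    split_ifs with hin
    · exact hndj0
    · rw [List.nodup_append]
      refine ⟨hndj0, List.nodup_singleton a, ?_⟩
      intro x hx y hy heq
      rw [List.mem_singleton.mp hy] at heq
      exact hin (heq ▸ hx)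
  have hndj2 : j2.Nodup := by
    rw [hj2]
    split_ifs with hin
    · exact hndj1
    · rw [List.nodup_append]
      refine ⟨hndj1, List.nodup_singleton b, ?_⟩
      intro x hx y hy heq
      rw [List.mem_singleton.mp hy] at heq
      exact hin (heq ▸ hx)
  refine ⟨?_, ?_, ?_, ?_, ?_⟩
  · intro c hcm
    rcases List.mem_append.mp hcm with hcm | hcm
    · exact h1 c (hrmem c hcm).1
    · rw [List.mem_singleton.mp hcm]
      exact fun he => by rw [he] at hbj2; cases hbj2
  · intro c hcm
    rcases List.mem_append.mp hcm with hcm | hcm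
    · exact h2 c (hrmem c hcm).1
    · rw [List.mem_singleton.mp hcm]; exact hndj2
  · rw [List.pairwise_append]
    refine ⟨h3.sublist List.filter_sublist, by simp, ?_⟩
    intro c hcm d hd x hxc hxd
    rw [List.mem_singleton.mp hd] at hxd
    obtain ⟨hcm', hac, hbc⟩ := hrmem c hcm
    rcases (hmem2 x).mp hxd with hx0 | rfl | rfl
    · rcases (hmem0 x).mp hx0 with ⟨e, hem, hxe, hae⟩
      have hne : c ≠ e := by
        rintro rfl
        rcases hae with hae | hbe
        · exact hac hae
        · exact hbc hbe
      exact pvPairwise_get h3 hcm' hem hne hxc hxe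
    · exact hac hxc
    · exact hbc hxc
  · intro x
    rw [pvEnds_append]
    constructor
    · rintro ⟨c, hcm, hxc⟩
      rcases List.mem_append.mp hcm with hcm | hcm
      · exact Or.inl ((h4 x).mp ⟨c, (hrmem c hcm).1, hxc⟩)
      · rw [List.mem_singleton.mp hcm] at hxc
        rcases (hmem2 x).mp hxc with hx0 | rfl | rfl
        · rcases (hmem0 x).mp hx0 with ⟨c', hcm', hxc', _⟩
          exact Or.inl ((h4 x).mp ⟨c', hcm', hxc'⟩)
        · exact Or.inr (Or.inl rfl)
        · exact Or.inr (Or.inr rfl)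
    · rintro (hx | rfl | rfl)
      · rcases (h4 x).mpr hx with ⟨c, hcm, hxc⟩
        by_cases hab : a ∈ c ∨ b ∈ c
        · exact ⟨j2, List.mem_append.mpr (Or.inr (by simp)),
            (hmem2 x).mpr (Or.inl ((hmem0 x).mpr ⟨c, hcm, hxc, hab⟩))⟩
        · rw [not_or] at hab
          refine ⟨c, List.mem_append.mpr (Or.inl ?_), hxc⟩
          rw [hrest, List.mem_filter]
          simp only [Bool.and_eq_true, Bool.not_eq_true', decide_eq_false_iff_not]
          exact ⟨hcm, hab.1, hab.2⟩
      · exact ⟨j2, List.mem_append.mpr (Or.inr (by simp)), haj2⟩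
      · exact ⟨j2, List.mem_append.mpr (Or.inr (by simp)), hbj2⟩
  · intro c hcm x hxc y
    rcases List.mem_append.mp hcm with hcm | hcm
    · obtain ⟨hcm', hac, hbc⟩ := hrmem c hcm
      constructor
      · intro hxy
        rcases pvConn_append_single.mp hxy with hy | ⟨hxa, _⟩ | ⟨hxb, _⟩
        · exact (h5 c hcm' x hxc y).mp hy
        · exact absurd ((h5 c hcm' x hxc a).mp hxa) hac
        · exact absurd ((h5 c hcm' x hxc b).mp hxb) hbc
      · intro hyc
        exact pvConn_mono _ ((h5 c hcm' x hxc y).mpr hyc)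
    · have hcj : c = j2 := List.mem_singleton.mp hcm
      subst hcj
      constructor
      · intro hxy
        exact hclosed2 y (pvConn_trans (hconn_a x hxc) hxy)
      · intro hyc
        exact pvConn_trans (pvConn_symm (hconn_a x hxc)) (hconn_a y hyc)

theorem pvB_roads_part :
    ∀ (cities : List (List Int)) (es : List (Int × Int)) (comps : List (List Int)),
      pvIsPart (pvConn es) (pvEnds es) comps →
      pvIsPart (pvConn (es ++ pvEdges cities)) (pvEnds (es ++ pvEdges cities))
        (cities.foldl pvB_step comps) := by
  intro cities
  induction cities with
  | nil => intro es comps h; simpa [pvEdges] using h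
  | cons road rest ih =>
      intro es comps h
      have h1 := pvB_merge_part (a := PySem.List.pyGetD road 0 0 - 1)
        (b := PySem.List.pyGetD road 1 0 - 1) h
      have h2 := ih (es ++ [(PySem.List.pyGetD road 0 0 - 1, PySem.List.pyGetD road 1 0 - 1)])
        (pvB_step comps road) h1
      simp only [List.foldl_cons]
      have : es ++ [(PySem.List.pyGetD road 0 0 - 1, PySem.List.pyGetD road 1 0 - 1)] ++
          pvEdges rest = es ++ pvEdges (road :: rest) := by
        simp [pvEdges, List.append_assoc]
      rwa [this] at h2

theorem pvB_singles_part {R : Int → Int → Prop} :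
    ∀ (xs : List Int) (dom : Int → Prop) (comps : List (List Int)),
      pvIsPart R dom comps → (∀ x, R x x) →
      (∀ x y, R x y → x ≠ y → dom x) →
      pvIsPart R (fun x => dom x ∨ x ∈ xs) (xs.foldl pvB_single comps) := by
  intro xs
  induction xs with
  | nil =>
      intro dom comps h _ _
      exact pvIsPart_congr h (by simp)
  | cons i rest ih =>
      intro dom comps h hrefl hdom
      simp only [List.foldl_cons]
      have hstep : pvIsPart R (fun x => dom x ∨ x = i) (pvB_single comps i) := by
        obtain ⟨h1, h2, h3, h4, h5⟩ := h
        by_cases hcov : comps.any (fun c => decide (i ∈ c)) = true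
        · have he : pvB_single comps i = comps := by simp [pvB_single, hcov]
          rw [he]
          have hdomi : dom i := by
            rcases List.any_eq_true.mp hcov with ⟨c, hcmem, hci⟩
            exact (h4 i).mp ⟨c, hcmem, by simpa using hci⟩
          refine ⟨h1, h2, h3, ?_, h5⟩
          intro x
          rw [h4 x]
          constructor
          · exact Or.inl
          · rintro (hx | rfl)
            · exact hx
            · exact hdomi
        · have hnc : ∀ c ∈ comps, i ∉ c := by
            intro c hcm hci
            exact hcov (List.any_eq_true.mpr ⟨c, hcm, by simpa using hci⟩)
          have he : pvB_single comps i = comps ++ [[i]] := by simp [pvB_single, hcov]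
          rw [he]
          have hnotdom : ¬ dom i := fun hd => by
            rcases (h4 i).mpr hd with ⟨c, hcm, hci⟩
            exact hnc c hcm hci
          refine ⟨?_, ?_, ?_, ?_, ?_⟩
          · intro c hcm
            rcases List.mem_append.mp hcm with hcm | hcm
            · exact h1 c hcm
            · simp only [List.mem_singleton] at hcm; subst hcm; simp
          · intro c hcm
            rcases List.mem_append.mp hcm with hcm | hcm
            · exact h2 c hcm
            · simp only [List.mem_singleton] at hcm; subst hcm; simp
          · rw [List.pairwise_append]
            refine ⟨h3, by simp, ?_⟩
            intro c hcm d hd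
            simp only [List.mem_singleton] at hd; subst hd
            intro x hxc hxi
            simp only [List.mem_singleton] at hxi; subst hxi
            exact hnc c hcm hxc
          · intro x
            constructor
            · rintro ⟨c, hcm, hxc⟩
              rcases List.mem_append.mp hcm with hcm | hcm
              · exact Or.inl ((h4 x).mp ⟨c, hcm, hxc⟩)
              · simp only [List.mem_singleton] at hcm; subst hcm
                simp only [List.mem_singleton] at hxc; subst hxc
                exact Or.inr rfl
            · rintro (hx | heq)
              · rcases (h4 x).mpr hx with ⟨c, hcm, hxc⟩
                exact ⟨c, List.mem_append.mpr (Or.inl hcm), hxc⟩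
              · exact ⟨[i], List.mem_append.mpr (Or.inr (by simp)), by simp [heq]⟩
          · intro c hcm x hxc y
            rcases List.mem_append.mp hcm with hcm | hcm
            · exact h5 c hcm x hxc y
            · simp only [List.mem_singleton] at hcm; subst hcm
              simp only [List.mem_singleton] at hxc
              constructor
              · intro hr
                by_cases hxy : x = y
                · subst hxy; simp [hxc]
                · exact absurd (hxc ▸ hdom x y hr hxy) hnotdom
              · intro hy
                simp only [List.mem_singleton] at hy
                rw [hxc, hy]
                exact hrefl i
      have hrec := ih (fun x => dom x ∨ x = i) (pvB_single comps i) hstep hrefl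
        (fun x y hr hne => Or.inl (hdom x y hr hne))
      exact pvIsPart_congr hrec (by intro x; simp only [List.mem_cons]; tauto)

theorem pvSum_price (c_lib c_road : Int) :
    ∀ (l : List (List Int)),
      ((l.map (fun c => c_lib + c_road * ((c.length : Int) - 1))).sum)
        = c_lib * l.length + c_road * (((l.map List.length).sum : Int) - l.length) := by
  intro l
  induction l with
  | nil => simp
  | cons c rest ih =>
      simp only [List.map_cons, List.sum_cons, ih, List.length_cons]
      push_cast
      ring

theorem pvFind?_unique {α : Type} (p : α → Bool) (c : α) :
    ∀ (l : List α), c ∈ l → p c = true → (∀ d ∈ l, p d = true → d = c) →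
      l.find? p = some c := by
  intro l
  induction l with
  | nil => simp
  | cons d rest ih =>
      intro hmem hp huniq
      by_cases hd : p d = true
      · have h1 : d = c := huniq d (by simp) hd
        subst h1; simp [List.find?, hp]
      · have hdc : d ≠ c := fun h => hd (h ▸ hp)
        have hc : c ∈ rest := by
          rcases List.mem_cons.mp hmem with h | h
          · exact absurd h.symm hdc
          · exact h
        rw [List.find?_cons_of_neg (by simpa using hd)]
        exact ih hc hp (fun e he hpe => huniq e (List.mem_cons_of_mem _ he) hpe)

-- ---- final counting bridge ----

theorem pvBridge (n c_lib c_road : Int) (es : List (Int × Int))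
    (comps : List (List Int)) (Vf : List Int) (Rf : Finset Int)
    (hpart : pvIsPart (pvConn es) (fun x => x ∈ pvNodes n es) comps)
    (hrange : ∀ x ∈ pvNodes n es, 0 ≤ x ∧ x < n)
    (hnd : Vf.Nodup)
    (hmem : ∀ x : Int, x ∈ Vf ↔ ∃ s0, 0 ≤ s0 ∧ s0 < n ∧ pvConn es s0 x)
    (hrSub : ∀ r ∈ Rf, r ∈ Vf)
    (hrSep : ∀ r ∈ Rf, ∀ r' ∈ Rf, r ≠ r' → ¬ pvConn es r r')
    (hrCov : ∀ x ∈ Vf, ∃ r ∈ Rf, pvConn es r x) :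
    c_lib * Rf.card + c_road * ((Vf.length : Int) - Rf.card) =
      (comps.map (fun c => c_lib + c_road * ((c.length : Int) - 1))).sum := by
  obtain ⟨h1, h2, h3, h4, h5⟩ := hpart
  -- comps has no duplicate classes
  have hcompsnd : comps.Nodup := by
    rw [List.nodup_iff_sublist]
    intro c hsub
    have hp : List.Pairwise List.Disjoint [c, c] := h3.sublist hsub
    have hd : List.Disjoint c c := (List.pairwise_cons.mp hp).1 c (by simp)
    have hcm : c ∈ comps := hsub.subset (by simp)
    rcases List.exists_mem_of_ne_nil c (h1 c hcm) with ⟨x, hx⟩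
    exact hd hx hx
  -- Vf has the same members as comps.flatten
  have hVf_comps : ∀ x : Int, x ∈ Vf ↔ x ∈ comps.flatten := by
    intro x
    constructor
    · intro hx
      rcases (hmem x).mp hx with ⟨s0, h0, hn', hconn⟩
      have hs0N : s0 ∈ pvNodes n es := pvStart_mem_nodes h0 hn'
      rcases (h4 s0).mpr hs0N with ⟨c, hcm, hs0c⟩
      exact List.mem_flatten.mpr ⟨c, hcm, (h5 c hcm s0 hs0c x).mp hconn⟩
    · intro hx
      rcases List.mem_flatten.mp hx with ⟨c, hcm, hxc⟩
      have hxN : x ∈ pvNodes n es := (h4 x).mp ⟨c, hcm, hxc⟩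
      rcases hrange x hxN with ⟨hx0, hxn⟩
      exact (hmem x).mpr ⟨x, hx0, hxn, Relation.ReflTransGen.refl⟩
  have hflnd : comps.flatten.Nodup := List.nodup_flatten.mpr ⟨h2, h3⟩
  have hlen : Vf.length = comps.flatten.length :=
    ((List.perm_ext_iff_of_nodup hnd hflnd).mpr hVf_comps).length_eq
  -- each root lies in a unique class
  have huniq : ∀ r : Int, ∀ c ∈ comps, r ∈ c → ∀ d ∈ comps, r ∈ d → d = c := by
    intro r c hcg hrc d hdg hrd
    by_contra hne
    exact pvPairwise_get h3 hdg hcg hne hrd hrc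
  set pc : Int → List Int := fun r => (comps.find? (fun c => decide (r ∈ c))).getD [] with hpc
  have hpcspec : ∀ r ∈ Rf, pc r ∈ comps ∧ r ∈ pc r := by
    intro r hr
    rcases List.mem_flatten.mp ((hVf_comps r).mp (hrSub r hr)) with ⟨c, hcg, hrc⟩
    have : comps.find? (fun c => decide (r ∈ c)) = some c :=
      pvFind?_unique _ c comps hcg (by simp [hrc])
        (fun d hd hpd => huniq r c hcg hrc d hd (by simpa using hpd))
    rw [hpc]
    simp only [this, Option.getD_some]
    exact ⟨hcg, hrc⟩
  have hcard : Rf.card = comps.length := by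
    rw [← List.toFinset_card_of_nodup hcompsnd]
    apply Finset.card_bij (fun r _ => pc r)
    · intro r hr
      rw [List.mem_toFinset]
      exact (hpcspec r hr).1
    · intro r1 hr1 r2 hr2 heq
      obtain ⟨hg1, hm1⟩ := hpcspec r1 hr1
      obtain ⟨hg2, hm2⟩ := hpcspec r2 hr2
      rw [heq] at hm1
      by_contra hne
      exact hrSep r1 hr1 r2 hr2 hne
        ((h5 (pc r2) hg2 r1 hm1 r2).mpr hm2)
    · intro c hc
      rw [List.mem_toFinset] at hc
      rcases List.exists_mem_of_ne_nil c (h1 c hc) with ⟨x, hxc⟩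
      have hxV : x ∈ Vf := (hVf_comps x).mpr (List.mem_flatten.mpr ⟨c, hc, hxc⟩)
      rcases hrCov x hxV with ⟨r, hr, hconn⟩
      have hrc : r ∈ c := (h5 c hc x hxc r).mp (pvConn_symm hconn)
      refine ⟨r, hr, ?_⟩
      have : comps.find? (fun c => decide (r ∈ c)) = some c :=
        pvFind?_unique _ c comps hc (by simp [hrc])
          (fun d hd hpd => huniq r c hc hrc d hd (by simpa using hpd))
      rw [hpc]
      simp [this]
  rw [pvSum_price, hlen, List.length_flatten, hcard]

-- ===== VERDICT (by name: the statement is the Claim_ definition above) =====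
theorem roadsAndLibraries_spec : Claim_equal_roadsAndLibraries := by
  unfold Claim_equal_roadsAndLibraries
  intro n c_lib c_road cities _ hpre
  unfold Spec_roadsAndLibraries
  by_cases hcl : c_road ≥ c_lib
  · simp [roadsAndLibraries, roadsAndLibraries_alt, hcl]
  · have hdom : ∀ road ∈ cities, 2 ≤ road.length ∧
        1 ≤ PySem.List.pyGetD road 0 0 ∧ PySem.List.pyGetD road 0 0 ≤ n ∧
        1 ≤ PySem.List.pyGetD road 1 0 ∧ PySem.List.pyGetD road 1 0 ≤ n :=
      hpre.resolve_left hcl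
    set es := pvEdges cities with hes
    have hrange : ∀ x ∈ pvNodes n es, 0 ≤ x ∧ x < n := by
      intro x hx
      simp only [pvNodes, PySem.List.dedup_eq_ofList, PySem.Set.mem_ofList, List.mem_append,
        List.mem_flatMap] at hx
      rcases hx with hx | ⟨p, hp, hxp⟩
      · exact PySem.List.mem_pyRange_one.mp hx
      · rw [hes, pvEdges] at hp
        rcases List.mem_map.mp hp with ⟨road, hroad, rfl⟩
        rcases hdom road hroad with ⟨_, hb1, hb2, hb3, hb4⟩
        simp only [List.mem_cons, List.not_mem_nil, or_false] at hxp
        rcases hxp with rfl | rfl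
        · exact ⟨by omega, by omega⟩
        · exact ⟨by omega, by omega⟩
    set conn := (PySem.List.pyRange 0 n 1).foldl pvA_fillStep
      (cities.foldl pvA_line PySem.Dict.empty) with hconn0
    have hconnD : ∀ i y : Int, y ∈ conn.getD i [] ↔ pvEStep es i y := by
      intro i y
      rw [hconn0, pvFill_getD, pvBuild_getD_mem]
      simp [PySem.Dict.getD_empty, hes]
    -- initial invariant for A's while-loop
    have hinv0 : pvAInv n es c_lib c_road ∅ [] [] 0 [] ((PySem.List.pyRange 0 n 1).reverse) := by
      refine ⟨?_, List.nodup_nil, ?_, ?_, ?_, ?_, ?_, List.suffix_refl _, ?_, ?_, ?_, ?_, ?_⟩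
      · intro x hx; cases hx
      · intro x hx; cases hx
      · intro x hx; cases hx
      · intro x hx; cases hx
      · intro x hx _; cases hx
      · intro x hx; cases hx
      · intro x h1 h2
        exact Or.inr (List.mem_reverse.mpr (PySem.List.mem_pyRange_one.mpr ⟨h1, h2⟩))
      · intro r hr; cases hr
      · intro r hr; cases hr
      · intro x hx; cases hx
      · simp
    obtain ⟨Vf, Rf, hres, hnd, hmem, hrSub, hrSep, hrCov⟩ :=
      pvA_loop_post n es conn c_lib c_road hconnD
        (n.toNat + n.toNat + 2 * cities.length + 1) [] [] 0 []
        ((PySem.List.pyRange 0 n 1).reverse) ∅ hinv0 (by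
          have h1 := pvNodes_length_le n cities
          rw [← hes] at h1
          simp only [List.nil_append, List.length_reverse, PySem.List.length_pyRange_one,
            List.length_nil]
          omega)
    rw [List.nil_append] at hres
    -- B's fold builds the connectivity partition
    have hB0 : pvIsPart (pvConn ([] : List (Int × Int))) (pvEnds ([] : List (Int × Int))) [] := by
      refine ⟨by simp, by simp, by simp, ?_, by simp⟩
      intro x
      constructor
      · rintro ⟨c, hc, _⟩; cases hc
      · rintro ⟨p, hp, _⟩; cases hp
    have hroads := pvB_roads_part cities [] [] hB0
    rw [List.nil_append, ← hes] at hroads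
    have hsingles := pvB_singles_part (PySem.List.pyRange 0 n 1) (pvEnds es)
      (cities.foldl pvB_step []) hroads (fun x => Relation.ReflTransGen.refl)
      (by
        intro x y hc hne
        by_contra hd
        exact hne ((pvConn_escape hc hd).symm))
    have hpart : pvIsPart (pvConn es)
        (fun x => x ∈ pvNodes n es)
        ((PySem.List.pyRange 0 n 1).foldl pvB_single (cities.foldl pvB_step [])) := by
      refine pvIsPart_congr hsingles ?_
      intro x
      simp only [pvNodes, PySem.List.dedup_eq_ofList, PySem.Set.mem_ofList, List.mem_append,
        List.mem_flatMap, pvEnds, List.mem_cons, List.not_mem_nil, or_false]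
      constructor
      · rintro (⟨p, hp, hx⟩ | hx)
        · exact Or.inr ⟨p, hp, by tauto⟩
        · exact Or.inl hx
      · rintro (hx | ⟨p, hp, hx⟩)
        · exact Or.inr hx
        · exact Or.inl ⟨p, hp, by tauto⟩
    have hbridge := pvBridge n c_lib c_road es
      ((PySem.List.pyRange 0 n 1).foldl pvB_single (cities.foldl pvB_step [])) Vf Rf
      hpart hrange hnd hmem hrSub hrSep hrCov
    show roadsAndLibraries n c_lib c_road cities = roadsAndLibraries_alt n c_lib c_road cities
    rw [roadsAndLibraries, roadsAndLibraries_alt, if_neg hcl, if_neg hcl]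
    show pvA_loop ((PySem.List.pyRange 0 n 1).foldl pvA_fillStep
        (cities.foldl pvA_line PySem.Dict.empty)) c_lib c_road
        (n.toNat + n.toNat + 2 * cities.length + 1) PySem.Set.empty PySem.Set.empty 0
        ((PySem.List.pyRange 0 n 1).reverse) =
      (((PySem.List.pyRange 0 n 1).foldl pvB_single (cities.foldl pvB_step [])).map
        (fun c => c_lib + c_road * ((c.length : Int) - 1))).sum
    rw [← hconn0]
    show pvA_loop conn c_lib c_road (n.toNat + n.toNat + 2 * cities.length + 1) [] [] 0
        ((PySem.List.pyRange 0 n 1).reverse) = _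
    rw [hres, hbridge]
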